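-- pv_equiv track=rewrite | github.com/ali-john/Optic-Disc-Extraction-from-Retinal-Images | cca.py | haveSameLabels
-- ===== SOURCE A (Python) =====
-- def haveSameLabels(inputArr):
--     temp = []
--     for i in range(len(inputArr)):
--         if inputArr[i] != 0:
--             temp.append(inputArr[i])
--     x = True
--     for i in range(1, len(temp)):
--         if temp[i] != temp[i - 1]:
--             x = False
--     return x
-- ===== SOURCE B (Python) =====
-- def haveSameLabels(inputArr):
--     prev = None
--     for v in inputArr:
--         if v == 0:
--             continue
--         if prev is not None and v != prev:
--             return False
--         prev = v
--     return True
-- ===== Notes on version B (the rewrite author's own statement) =====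
-- stated objective: faster
-- what changed: Replaces A's two index-based passes (build a list of non-zeros, then compare each to its predecessor with no early exit) by a single direct pass that keeps only the last non-zero seen and returns False immediately on a mismatch.
import Mathlib
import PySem

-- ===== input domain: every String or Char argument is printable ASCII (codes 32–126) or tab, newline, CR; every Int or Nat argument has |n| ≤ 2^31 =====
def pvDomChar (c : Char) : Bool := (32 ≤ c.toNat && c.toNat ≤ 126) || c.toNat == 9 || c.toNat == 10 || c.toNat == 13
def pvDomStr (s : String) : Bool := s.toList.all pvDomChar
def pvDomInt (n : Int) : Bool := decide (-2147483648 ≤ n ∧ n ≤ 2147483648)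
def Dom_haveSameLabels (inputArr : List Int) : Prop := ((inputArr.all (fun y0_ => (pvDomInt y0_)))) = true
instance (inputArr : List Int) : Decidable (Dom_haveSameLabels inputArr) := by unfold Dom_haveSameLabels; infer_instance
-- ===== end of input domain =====

-- B fuses A's two passes (collect non-zeros, then compare each to its predecessor with no early
-- exit) into one direct pass that tracks only the previous non-zero and exits early on a mismatch.


-- ===== PORT A =====
def haveSameLabels (inputArr : List Int) : Bool :=
  -- temp = []; for i in range(len(inputArr)): if inputArr[i] != 0: temp.append(inputArr[i])
  let temp : List Int :=
    (PySem.List.pyRange 0 (PySem.List.len inputArr)).foldl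
      (fun acc i =>
        if PySem.List.pyGetD inputArr i 0 ≠ 0 then acc ++ [PySem.List.pyGetD inputArr i 0]
        else acc) []
  -- x = True; for i in range(1, len(temp)): if temp[i] != temp[i-1]: x = False
  (PySem.List.pyRange 1 (PySem.List.len temp)).foldl
    (fun x i =>
      if PySem.List.pyGetD temp i 0 ≠ PySem.List.pyGetD temp (i - 1) 0 then false else x) true

-- ===== PORT B =====
-- the loop of Source B: prev is the last non-zero value seen (none = not seen yet)
def hslAltLoop : Option Int → List Int → Bool
  | _, [] => true
  | prev, v :: vs =>
    if v = 0 then hslAltLoop prev vs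
    else
      match prev with
      | some p => if v ≠ p then false else hslAltLoop (some v) vs
      | none => hslAltLoop (some v) vs

def haveSameLabels_alt (inputArr : List Int) : Bool :=
  hslAltLoop none inputArr

-- ===== PRECONDITION & SPEC =====
def Spec_haveSameLabels (inputArr : List Int) (out : Bool) : Prop := out = haveSameLabels_alt inputArr
instance (inputArr : List Int) (out : Bool) : Decidable (Spec_haveSameLabels inputArr out) := by unfold Spec_haveSameLabels; infer_instance

-- ===== CLAIM (what is proved, stated in full; the proofs are below) =====
def Claim_equal_haveSameLabels : Prop := ∀ (inputArr : List Int), Dom_haveSameLabels inputArr → Spec_haveSameLabels inputArr (haveSameLabels inputArr)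

-- ===== LEMMAS AND PROOFS =====

-- "all adjacent elements equal", the common meaning of both programs
def hslAdjAll : List Int → Bool
  | [] => true
  | [_] => true
  | a :: b :: t => (a == b) && hslAdjAll (b :: t)

-- A's flag loop never resets to true: it is init && "no index fails"
theorem hsl_flagFold (p : Int → Prop) [DecidablePred p] (is : List Int) (init : Bool) :
    is.foldl (fun x i => if p i then false else x) init
      = (init && is.all (fun i => decide (¬ p i))) := by
  induction is generalizing init with
  | nil => simp
  | cons i is ih =>
    simp only [List.foldl_cons, List.all_cons, ih]
    by_cases h : p i <;> simp [h]

theorem hsl_adjAll_iff (l : List Int) :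
    hslAdjAll l = true ↔ ∀ (j : Nat), j + 1 < l.length → l.getD (j + 1) 0 = l.getD j 0 := by
  induction l with
  | nil => simp [hslAdjAll]
  | cons a t ih =>
    cases t with
    | nil => simp [hslAdjAll]
    | cons b t' =>
      simp only [hslAdjAll, Bool.and_eq_true, beq_iff_eq, ih]
      constructor
      · rintro ⟨hab, hrest⟩ j h
        cases j with
        | zero => simpa using hab.symm
        | succ j' =>
          have := hrest j' (by simpa using h)
          simpa using this
      · intro h
        refine ⟨by simpa using (h 0 (by simp)).symm, fun j hj => ?_⟩
        have := h (j + 1) (by simpa using hj)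
        simpa using this

-- A's index-based adjacent check equals hslAdjAll
theorem hsl_index_check (l : List Int) :
    ((PySem.List.pyRange 1 (PySem.List.len l)).all
        (fun i => decide (¬ PySem.List.pyGetD l i 0 ≠ PySem.List.pyGetD l (i - 1) 0)))
      = hslAdjAll l := by
  rw [Bool.eq_iff_iff, List.all_eq_true, hsl_adjAll_iff]
  constructor
  · intro h j hj
    have hmem : ((j : Int) + 1) ∈ PySem.List.pyRange 1 (PySem.List.len l) := by
      rw [PySem.List.mem_pyRange_one]
      simp only [PySem.List.len_eq]
      omega
    have := h _ hmem
    rw [decide_eq_true_iff, not_not,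
        PySem.List.pyGetD_of_nonneg l 0 (by omega),
        PySem.List.pyGetD_of_nonneg l 0 (by omega)] at this
    have h1 : ((j : Int) + 1).toNat = j + 1 := by omega
    have h2 : ((j : Int) + 1 - 1).toNat = j := by omega
    rw [h1, h2] at this
    exact this
  · intro h i hmem
    rw [PySem.List.mem_pyRange_one] at hmem
    simp only [PySem.List.len_eq] at hmem
    rw [decide_eq_true_iff, not_not,
        PySem.List.pyGetD_of_nonneg l 0 (by omega),
        PySem.List.pyGetD_of_nonneg l 0 (by omega)]
    have hj : (i - 1).toNat + 1 < l.length := by omega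
    have := h (i - 1).toNat hj
    have h1 : i.toNat = (i - 1).toNat + 1 := by omega
    rw [h1]
    exact this

-- B's loop checks adjacency of prev-prefixed filtered list
theorem hsl_altLoop_eq (xs : List Int) : ∀ (prev : Option Int),
    hslAltLoop prev xs
      = hslAdjAll ((match prev with | none => [] | some p => [p]) ++ xs.filter (fun v => decide (v ≠ 0))) := by
  induction xs with
  | nil => intro prev; cases prev <;> simp [hslAltLoop, hslAdjAll]
  | cons v vs ih =>
    intro prev
    by_cases hv : v = 0
    · cases prev <;> simp [hslAltLoop, hv, ih]
    · cases prev with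
      | none => simp [hslAltLoop, hv, ih (some v)]
      | some p =>
        by_cases hvp : v = p
        · subst hvp
          simp [hslAltLoop, hv, ih (some v), hslAdjAll]
        · simp [hslAltLoop, hv, hvp, hslAdjAll, Ne.symm hvp]

-- ===== VERDICT (by name: the statement is the Claim_ definition above) =====
theorem haveSameLabels_spec : Claim_equal_haveSameLabels := by
  intro inputArr _
  unfold Spec_haveSameLabels haveSameLabels haveSameLabels_alt
  rw [PySem.List.foldl_pyRange_zero_pyGetD inputArr 0
        (fun acc v => if v ≠ 0 then acc ++ [v] else acc) []]
  have hfil :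
      inputArr.foldl (fun acc v => if v ≠ 0 then acc ++ [v] else acc) []
        = inputArr.filter (fun v => decide (v ≠ 0)) := by
    have := PySem.List.foldl_append_if (fun v : Int => decide (v ≠ 0)) id inputArr []
    simpa using this
  rw [hfil, hsl_flagFold
        (fun i => PySem.List.pyGetD (inputArr.filter (fun v => decide (v ≠ 0))) i 0
                ≠ PySem.List.pyGetD (inputArr.filter (fun v => decide (v ≠ 0))) (i - 1) 0),
      Bool.true_and, hsl_index_check, hsl_altLoop_eq]
  rfl
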